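-- pv_equiv track=rewrite | github.com/peteromallet/text-ip-adapter | scripts/build_v3_5_from_v3_4.py | _clean_wrapped_bracket_blocks
-- ===== SOURCE A (Python) =====
-- def _clean_wrapped_bracket_blocks(lines: list[str]) -> tuple[list[str], int]:
--     kept: list[str] = []
--     removed = 0
--     in_block = False
--     for line in lines:
--         stripped = line.strip()
--         lower = stripped.lower()
--         starts_block = lower.startswith(("[picture:", "[illustration:", "[note on text:"))
--         if in_block or starts_block:
--             removed += 1
--             if "]" in stripped:
--                 in_block = False
--             else:
--                 in_block = True
--             continue
--         kept.append(line)
--     return kept, removed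
-- ===== SOURCE B (Python) =====
-- def _clean_wrapped_bracket_blocks(lines: list[str]) -> tuple[list[str], int]:
--     kept: list[str] = []
--     removed = 0
--     i = 0
--     n = len(lines)
--     while i < n:
--         line = lines[i]
--         stripped = line.strip()
--         low = stripped.lower()
--         if (low.startswith("[picture:") or low.startswith("[illustration:")
--                 or low.startswith("[note on text:")):
--             removed += 1
--             if "]" not in stripped:
--                 i += 1
--                 while i < n:
--                     removed += 1
--                     if "]" in lines[i].strip():
--                         break
--                     i += 1
--         else:
--             kept.append(line)
--         i += 1
--     return kept, removed
-- ===== Notes on version B (the rewrite author's own statement) =====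
-- stated objective: alternative
-- what changed: Replaced A's single pass with a persistent in_block boolean flag by a flag-free decomposition: an outer loop over lines that, on a block-start line without its closing ']', hands off to an inner skip loop consuming and counting the rest of the block.
import Mathlib
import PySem

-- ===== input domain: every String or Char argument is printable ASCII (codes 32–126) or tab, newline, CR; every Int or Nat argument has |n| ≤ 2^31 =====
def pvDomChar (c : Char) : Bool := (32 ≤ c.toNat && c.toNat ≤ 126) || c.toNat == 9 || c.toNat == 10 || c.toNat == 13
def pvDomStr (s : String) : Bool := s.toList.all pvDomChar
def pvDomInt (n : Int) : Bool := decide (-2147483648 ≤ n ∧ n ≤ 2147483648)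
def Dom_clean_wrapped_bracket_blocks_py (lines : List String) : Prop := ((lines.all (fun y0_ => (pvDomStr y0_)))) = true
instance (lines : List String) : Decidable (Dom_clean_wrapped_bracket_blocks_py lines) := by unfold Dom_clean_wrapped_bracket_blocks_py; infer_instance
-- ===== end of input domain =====

-- B drops A's persistent in_block flag: it keeps normal lines and, on a block start, skips the
-- whole block at once with an inner skip loop (objective: alternative decomposition, same cost).


-- ===== PORT A =====
-- the for-loop of A as structural recursion over (kept, removed, in_block)
def pvALoop : List String → List String → Int → Bool → List String × Int
  | [], kept, removed, _ => (kept, removed)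
  | line :: rest, kept, removed, inB =>
    let stripped := PySem.Str.strip line
    let low := PySem.Str.lower stripped
    let starts := PySem.Str.startswith low "[picture:" || PySem.Str.startswith low "[illustration:"
      || PySem.Str.startswith low "[note on text:"
    if inB || starts then
      if PySem.Str.isIn "]" stripped then
        pvALoop rest kept (removed + 1) false
      else
        pvALoop rest kept (removed + 1) true
    else
      pvALoop rest (kept ++ [line]) removed inB

def clean_wrapped_bracket_blocks_py (lines : List String) : List String × Int :=
  pvALoop lines [] 0 false

-- ===== PORT B =====
def pvStartsBlock (line : String) : Bool :=
  let low := PySem.Str.lower (PySem.Str.strip line)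
  PySem.Str.startswith low "[picture:" || PySem.Str.startswith low "[illustration:"
    || PySem.Str.startswith low "[note on text:"

def pvHasClose (line : String) : Bool := PySem.Str.isIn "]" (PySem.Str.strip line)

-- inner while-loop of B: consume lines up to and including the closing one, counting them
def pvSkip : List String → Int → List String × Int
  | [], acc => ([], acc)
  | l :: rest, acc => if pvHasClose l then (rest, acc + 1) else pvSkip rest (acc + 1)

theorem pvSkip_fst_length_le (xs : List String) (acc : Int) : (pvSkip xs acc).1.length ≤ xs.length := by
  induction xs generalizing acc with
  | nil => simp [pvSkip]
  | cons l rest ih =>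
    simp only [pvSkip]
    split
    · simp
    · exact le_trans (ih _) (by simp)

def pvGo : List String → List String × Int
  | [] => ([], 0)
  | l :: rest =>
    if pvStartsBlock l then
      if pvHasClose l then
        let p := pvGo rest
        (p.1, p.2 + 1)
      else
        let s := pvSkip rest 1
        let p := pvGo s.1
        (p.1, p.2 + s.2)
    else
      let p := pvGo rest
      (l :: p.1, p.2)
termination_by xs => xs.length
decreasing_by
  · simp
  · exact Nat.lt_succ_of_le (pvSkip_fst_length_le rest 1)
  · simp

def clean_wrapped_bracket_blocks_py_alt (lines : List String) : List String × Int :=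
  pvGo lines

-- ===== PRECONDITION & SPEC =====
def Spec_clean_wrapped_bracket_blocks_py (lines : List String) (out : List String × Int) : Prop := out = clean_wrapped_bracket_blocks_py_alt lines
instance (lines : List String) (out : List String × Int) : Decidable (Spec_clean_wrapped_bracket_blocks_py lines out) := by unfold Spec_clean_wrapped_bracket_blocks_py; infer_instance

-- ===== CLAIM (what is proved, stated in full; the proofs are below) =====
def Claim_equal_clean_wrapped_bracket_blocks_py : Prop := ∀ (lines : List String), Dom_clean_wrapped_bracket_blocks_py lines → Spec_clean_wrapped_bracket_blocks_py lines (clean_wrapped_bracket_blocks_py lines)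

-- ===== LEMMAS AND PROOFS =====

theorem pvSkip_shift (xs : List String) (a : Int) :
    pvSkip xs a = ((pvSkip xs 0).1, a + (pvSkip xs 0).2) := by
  induction xs generalizing a with
  | nil => simp [pvSkip]
  | cons l rest ih =>
    simp only [pvSkip]
    split
    · simp; try omega
    · rw [ih (a + 1), ih (0 + 1)]
      simp [Prod.ext_iff]; try omega

-- A's loop in the in_block = true state is exactly B's skip loop followed by the normal state
theorem pvALoop_true (xs : List String) (kept : List String) (removed : Int) :
    pvALoop xs kept removed true
      = pvALoop (pvSkip xs 0).1 kept (removed + (pvSkip xs 0).2) false := by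
  induction xs generalizing removed with
  | nil => simp [pvALoop, pvSkip]
  | cons l rest ih =>
    simp only [pvALoop, pvSkip, Bool.true_or, if_true]
    rw [show PySem.Str.isIn "]" (PySem.Str.strip l) = pvHasClose l from rfl]
    by_cases h : pvHasClose l = true
    · simp [h]
    · rw [if_neg h, if_neg h, ih, pvSkip_shift rest (0 + 1)]
      have : removed + 1 + (pvSkip rest 0).2 = removed + (0 + 1 + (pvSkip rest 0).2) := by omega
      rw [this]

-- A's loop in the normal state computes B's result, appended to the accumulator
theorem pvALoop_false : ∀ (N : Nat) (xs : List String), xs.length ≤ N →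
    ∀ (kept : List String) (removed : Int),
    pvALoop xs kept removed false = (kept ++ (pvGo xs).1, removed + (pvGo xs).2) := by
  intro N
  induction N with
  | zero =>
    intro xs hx kept removed
    have : xs = [] := List.length_eq_zero_iff.mp (Nat.le_zero.mp hx)
    subst this
    simp [pvALoop, pvGo]
  | succ n ih =>
    intro xs hx kept removed
    cases xs with
    | nil => simp [pvALoop, pvGo]
    | cons l rest =>
      simp only [List.length_cons, Nat.succ_le_succ_iff] at hx
      by_cases hs : pvStartsBlock l
      · have hs' := hs
        simp only [pvStartsBlock] at hs'
        by_cases hc : pvHasClose l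
        · have hc' := hc; simp only [pvHasClose] at hc'
          simp only [pvALoop, pvGo, hs', hc', Bool.false_or, if_true, hs, hc]
          rw [ih rest hx]
          simp
          omega
        · have hc' : ¬ (PySem.Str.isIn "]" (PySem.Str.strip l) = true) := by
            simpa [pvHasClose] using hc
          simp only [pvALoop, pvGo, hs', Bool.false_or, if_true, hs, if_neg hc, if_neg hc']
          rw [pvALoop_true, ih (pvSkip rest 0).1 (le_trans (pvSkip_fst_length_le rest 0) hx),
            pvSkip_shift rest 1]
          simp
          omega
      · have hs' : ¬ ((PySem.Str.startswith (PySem.Str.lower (PySem.Str.strip l)) "[picture:"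
            || PySem.Str.startswith (PySem.Str.lower (PySem.Str.strip l)) "[illustration:"
            || PySem.Str.startswith (PySem.Str.lower (PySem.Str.strip l)) "[note on text:") = true) := by
          simpa [pvStartsBlock] using hs
        simp only [pvALoop, pvGo, Bool.false_or, if_neg hs', if_neg hs]
        rw [ih rest hx]
        simp

-- ===== VERDICT (by name: the statement is the Claim_ definition above) =====
theorem clean_wrapped_bracket_blocks_py_spec : Claim_equal_clean_wrapped_bracket_blocks_py := by
  intro lines _
  unfold Spec_clean_wrapped_bracket_blocks_py clean_wrapped_bracket_blocks_py clean_wrapped_bracket_blocks_py_alt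
  rw [pvALoop_false lines.length lines le_rfl]
  simp
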